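-- pv_equiv track=rewrite | github.com/CodingOnionFarmer/JNH-SCSA | 백준/Platinum/14506. Pieces of Parentheses/Pieces of Parentheses.py | check
-- ===== SOURCE A (Python) =====
-- def check(p):
--     left_max = 0
--     is_left = True
--     now = 0  # ( -1, ) +1
--     for i in range(len(p)):
--         if p[i] == '(':
--             now -= 1
--         else:
--             now += 1
--             if now > left_max:
--                 left_max += 1
--     if now > 0:
--         is_left = False
--     if is_left:
--         return True, left_max, -now
--     right_max = 0
--     now = 0
--     for i in range(len(p) - 1, -1, -1):
--         if p[i] == ')':
--             now -= 1
--         else: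
--             now += 1
--             if now > right_max:
--                 right_max += 1
--     return False, right_max, -now
-- ===== SOURCE B (Python) =====
-- def check(p):
--     # One forward pass; the conditional reverse scan is replaced by closed-form
--     # arithmetic from each direction's total and running prefix-minimum.
--     b1 = m1 = b2 = m2 = 0
--     for c in p:
--         b1 += 1 if c == '(' else -1
--         b2 += -1 if c == ')' else 1
--         m1 = min(m1, b1)
--         m2 = min(m2, b2)
--     if b1 >= 0:
--         return True, -m1, b1
--     return False, b2 - m2, -b2
-- ===== Notes on version B (the rewrite author's own statement) =====
-- stated objective: alternative
-- what changed: A's conditional second reverse scan with incremental max-tracking is replaced by a single forward pass that keeps both directions' running balances and prefix minima, from which both results follow by closed-form arithmetic.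
import Mathlib
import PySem

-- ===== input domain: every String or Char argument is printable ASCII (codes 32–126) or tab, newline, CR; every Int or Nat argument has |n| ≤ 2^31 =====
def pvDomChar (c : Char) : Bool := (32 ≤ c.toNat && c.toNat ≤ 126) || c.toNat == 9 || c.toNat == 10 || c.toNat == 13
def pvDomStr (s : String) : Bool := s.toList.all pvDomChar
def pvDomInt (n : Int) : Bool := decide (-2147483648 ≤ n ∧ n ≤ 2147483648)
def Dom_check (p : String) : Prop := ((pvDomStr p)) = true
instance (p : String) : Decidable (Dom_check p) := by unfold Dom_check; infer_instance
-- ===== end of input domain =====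

-- B replaces A's conditional second reverse scan by one forward pass with closed-form arithmetic (alternative, same cost up to constants).

-- ===== PORT A =====
-- literal transliteration: first loop over p, then the conditional reverse loop
def check (p : String) : Bool × Int × Int :=
  let s1 := p.toList.foldl
    (fun (st : Int × Int) c =>
      if c = '(' then (st.1, st.2 - 1)
      else
        let now := st.2 + 1
        if now > st.1 then (st.1 + 1, now) else (st.1, now)) (0, 0)
  let isLeft := if s1.2 > 0 then false else true
  if isLeft then (true, s1.1, -s1.2)
  else
    let s2 := p.toList.reverse.foldl
      (fun (st : Int × Int) c =>
        if c = ')' then (st.1, st.2 - 1)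
        else
          let now := st.2 + 1
          if now > st.1 then (st.1 + 1, now) else (st.1, now)) (0, 0)
    (false, s2.1, -s2.2)

-- ===== PORT B =====
-- one forward pass tracking both direction balances and their running prefix minima
def check_alt (p : String) : Bool × Int × Int :=
  let s := p.toList.foldl
    (fun (st : Int × Int × Int × Int) c =>
      let b1 := st.1 + (if c = '(' then 1 else -1)
      let b2 := st.2.2.1 + (if c = ')' then -1 else 1)
      (b1, min st.2.1 b1, b2, min st.2.2.2 b2)) (0, 0, 0, 0)
  if s.1 ≥ 0 then (true, -s.2.1, s.1)
  else (false, s.2.2.1 - s.2.2.2, -s.2.2.1)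

-- ===== PRECONDITION & SPEC =====
def Spec_check (p : String) (out : Bool × Int × Int) : Prop := out = check_alt p
instance (p : String) (out : Bool × Int × Int) : Decidable (Spec_check p out) := by unfold Spec_check; infer_instance

-- ===== CLAIM (what is proved, stated in full; the proofs are below) =====
def Claim_equal_check : Prop := ∀ (p : String), Dom_check p → Spec_check p (check p)

-- ===== LEMMAS AND PROOFS =====

-- proof-side spec functions: weighted sum, min-prefix and max-prefix (both including the empty prefix)
def pvS (w : Char → Int) : List Char → Int
  | [] => 0
  | c :: l => w c + pvS w l

def pvN (w : Char → Int) : List Char → Int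
  | [] => 0
  | c :: l => min 0 (w c + pvN w l)

def pvX (w : Char → Int) : List Char → Int
  | [] => 0
  | c :: l => max 0 (w c + pvX w l)

lemma pvN_nonpos (w : Char → Int) (l : List Char) : pvN w l ≤ 0 := by
  cases l <;> simp [pvN]

lemma pvX_nonneg (w : Char → Int) (l : List Char) : 0 ≤ pvX w l := by
  cases l <;> simp [pvX]

lemma pvN_le_pvS (w : Char → Int) (l : List Char) : pvN w l ≤ pvS w l := by
  induction l with
  | nil => simp [pvN, pvS]
  | cons c l ih => simp [pvN, pvS]; omega

lemma pvX_append (w : Char → Int) (l : List Char) (c : Char) :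
    pvX w (l ++ [c]) = max (pvX w l) (pvS w l + w c) := by
  induction l with
  | nil => simp [pvX, pvS]
  | cons x l ih => simp [pvX, pvS, ih]; omega

lemma pvS_append (w : Char → Int) (l : List Char) (c : Char) :
    pvS w (l ++ [c]) = pvS w l + w c := by
  induction l with
  | nil => simp [pvS]
  | cons x l ih => simp [pvS, ih]; omega

lemma pvS_reverse (w : Char → Int) (l : List Char) : pvS w l.reverse = pvS w l := by
  induction l with
  | nil => rfl
  | cons c l ih => simp [List.reverse_cons, pvS_append, pvS, ih]; omega

lemma pvX_reverse (w : Char → Int) (l : List Char) :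
    pvX w l.reverse = pvS w l - pvN w l := by
  induction l with
  | nil => simp [pvX, pvS, pvN]
  | cons c l ih =>
    simp [List.reverse_cons, pvX_append, pvS_reverse, ih, pvS, pvN]
    omega

-- closed form of A's max-tracking loop, for a generic distinguished character d
lemma loopA_closed (d : Char) (l : List Char) : ∀ lm now : Int, now ≤ lm →
    l.foldl (fun (st : Int × Int) c =>
      if c = d then (st.1, st.2 - 1)
      else
        let n := st.2 + 1
        if n > st.1 then (st.1 + 1, n) else (st.1, n)) (lm, now)
      = (max lm (now + pvX (fun c => if c = d then -1 else 1) l),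
         now + pvS (fun c => if c = d then -1 else 1) l) := by
  induction l with
  | nil => intro lm now h; simp [pvX, pvS]; omega
  | cons c l ih =>
    intro lm now h
    by_cases hc : c = d
    · subst hc
      simp only [List.foldl_cons, if_true]
      rw [ih lm (now - 1) (by omega)]
      have := pvX_nonneg (fun x => if x = c then -1 else 1) l
      simp [pvX, pvS, Prod.ext_iff]
      constructor <;> omega
    · simp only [List.foldl_cons, if_neg hc]
      by_cases hgt : now + 1 > lm
      · simp only [if_pos hgt]
        rw [ih (lm + 1) (now + 1) (by omega)]
        have := pvX_nonneg (fun x => if x = d then -1 else 1) l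
        simp [pvX, pvS, Prod.ext_iff, hc]
        constructor <;> omega
      · simp only [if_neg hgt]
        rw [ih lm (now + 1) (by omega)]
        simp [pvX, pvS, Prod.ext_iff, hc]
        constructor <;> omega

-- closed form of B's single four-component fold
lemma loopB_closed (l : List Char) : ∀ b1 m1 b2 m2 : Int, m1 ≤ b1 → m2 ≤ b2 →
    l.foldl (fun (st : Int × Int × Int × Int) c =>
      let b1 := st.1 + (if c = '(' then 1 else -1)
      let b2 := st.2.2.1 + (if c = ')' then -1 else 1)
      (b1, min st.2.1 b1, b2, min st.2.2.2 b2)) (b1, m1, b2, m2)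
      = (b1 + pvS (fun c => if c = '(' then 1 else -1) l,
         min m1 (b1 + pvN (fun c => if c = '(' then 1 else -1) l),
         b2 + pvS (fun c => if c = ')' then -1 else 1) l,
         min m2 (b2 + pvN (fun c => if c = ')' then -1 else 1) l)) := by
  induction l with
  | nil => intro b1 m1 b2 m2 h1 h2; simp [pvS, pvN]; omega
  | cons c l ih =>
    intro b1 m1 b2 m2 h1 h2
    simp only [List.foldl_cons]
    rw [ih _ _ _ _ (min_le_right _ _) (min_le_right _ _)]
    have n1 := pvN_nonpos (fun c => if c = '(' then 1 else -1) l
    have n2 := pvN_nonpos (fun c => if c = ')' then -1 else 1) l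
    simp [pvS, pvN]
    refine ⟨by omega, by omega, by omega, by omega⟩

-- ===== VERDICT (by name: the statement is the Claim_ definition above) =====
theorem check_spec : Claim_equal_check := by
  intro p _
  show check p = check_alt p
  unfold check check_alt
  rw [loopA_closed '(' p.toList 0 0 le_rfl,
      loopA_closed ')' p.toList.reverse 0 0 le_rfl,
      loopB_closed p.toList 0 0 0 0 le_rfl le_rfl]
  have hX1 := pvX_nonneg (fun c => if c = '(' then -1 else 1) p.toList
  have hN1 := pvN_nonpos (fun c => if c = '(' then 1 else -1) p.toList
  have hS1 : pvS (fun c => if c = '(' then -1 else 1) p.toList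
      = - pvS (fun c => if c = '(' then 1 else -1) p.toList := by
    induction p.toList with
    | nil => simp [pvS]
    | cons c l ih => by_cases hc : c = '(' <;> simp [pvS, hc, ih] <;> omega
  have hX1N : pvX (fun c => if c = '(' then -1 else 1) p.toList
      = - pvN (fun c => if c = '(' then 1 else -1) p.toList := by
    induction p.toList with
    | nil => simp [pvX, pvN]
    | cons c l ih => by_cases hc : c = '(' <;> simp [pvX, pvN, hc, ih] <;> omega
  rw [pvX_reverse, pvS_reverse]
  simp only [hS1, hX1N]
  have hN1 := pvN_nonpos (fun c => if c = '(' then 1 else -1) p.toList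
  have hN2 := pvN_nonpos (fun c => if c = ')' then -1 else 1) p.toList
  have hNS2 := pvN_le_pvS (fun c => if c = ')' then -1 else 1) p.toList
  simp only [Prod.ext_iff]
  split_ifs
  all_goals simp_all
  all_goals omega
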